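-- pv_equiv track=rewrite | github.com/Victoire99/Time-Series-Clustering | extract_ts_feature.py | replace_with_order
-- ===== SOURCE A (Python) =====
-- def replace_with_order(lst):
--     mapping = {}
--     new_lst = []
--     counter = 0
--
--     for num in lst:
--         if num not in mapping:
--             mapping[num] = counter
--             counter += 1
--         new_lst.append(mapping[num])
--
--     return new_lst
-- ===== SOURCE B (Python) =====
-- def replace_with_order(lst):
--     # Each value's code is the number of distinct values occurring strictly
--     # before its first occurrence: a closed form per element, no incremental
--     # numbering state.
--     return [len(set(lst[:lst.index(x)])) for x in lst]
-- ===== Notes on version B (the rewrite author's own statement) =====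
-- stated objective: alternative
-- what changed: Replaces A's stateful numbering loop (dict plus running counter) by a stateless per-element closed form: each element maps to len(set(lst[:lst.index(x)])), the number of distinct values strictly before its first occurrence; no mapping dict and no counter are maintained.
import Mathlib
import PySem

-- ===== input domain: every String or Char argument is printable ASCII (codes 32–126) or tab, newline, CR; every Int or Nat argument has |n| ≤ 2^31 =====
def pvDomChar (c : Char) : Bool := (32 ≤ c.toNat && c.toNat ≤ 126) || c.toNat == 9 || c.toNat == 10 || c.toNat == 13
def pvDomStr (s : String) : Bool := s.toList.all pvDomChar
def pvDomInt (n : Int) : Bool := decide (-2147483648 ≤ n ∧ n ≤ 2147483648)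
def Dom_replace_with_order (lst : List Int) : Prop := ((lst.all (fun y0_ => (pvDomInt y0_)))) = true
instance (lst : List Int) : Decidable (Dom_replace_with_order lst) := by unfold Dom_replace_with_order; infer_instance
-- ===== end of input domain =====

-- B replaces A's stateful numbering loop (dict + counter) by a stateless per-element closed
-- form: the code of x is the number of distinct values strictly before x's first occurrence;
-- alternative algorithm (quadratic, no incremental state), not claimed faster.

-- ===== PORT A =====
-- A: one loop carrying (mapping, new_lst, counter); a value absent from mapping is assigned
-- the current counter, then mapping[num] is appended.
def replace_with_order (lst : List Int) : List Int :=
  (lst.foldl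
    (fun (st : PySem.Dict Int Int × List Int × Int) num =>
      let p := if st.1.contains num then (st.1, st.2.2) else (st.1.insert num st.2.2, st.2.2 + 1)
      (p.1, st.2.1 ++ [p.1.getD num 0], p.2))
    (PySem.Dict.empty, [], 0)).2.1

-- ===== PORT B =====
-- [len(set(lst[:lst.index(x)])) for x in lst]; x is always in lst, so .index never raises
-- (getD 0 is unreachable).
def replace_with_order_alt (lst : List Int) : List Int :=
  lst.map (fun x =>
    PySem.Set.len (PySem.Set.ofList
      (PySem.List.slice lst none (some (((PySem.List.index? lst x).getD 0 : Nat) : Int)))))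

-- ===== PRECONDITION & SPEC =====
def Spec_replace_with_order (lst : List Int) (out : List Int) : Prop := out = replace_with_order_alt lst
instance (lst : List Int) (out : List Int) : Decidable (Spec_replace_with_order lst out) := by unfold Spec_replace_with_order; infer_instance

-- ===== CLAIM (what is proved, stated in full; the proofs are below) =====
def Claim_equal_replace_with_order : Prop := ∀ (lst : List Int), Dom_replace_with_order lst → Spec_replace_with_order lst (replace_with_order lst)

-- ===== LEMMAS AND PROOFS =====

-- order-preserving dedup of `rest` appended after the already-seen values `S` (proof device)
def rwoDedup (S : List Int) : List Int → List Int
  | [] => S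
  | x :: xs => if x ∈ S then rwoDedup S xs else rwoDedup (S ++ [x]) xs

-- dict {value ↦ position} built from a distinct list (proof device for A's mapping)
def rwoIndex (distinct : List Int) : PySem.Dict Int Int :=
  (PySem.List.enumerate distinct).foldl (fun d p => d.insert p.2 p.1) PySem.Dict.empty

theorem rwo_enum_append (l : List Int) (y : Int) : ∀ s : Int,
    PySem.List.enumerate (l ++ [y]) s = PySem.List.enumerate l s ++ [(s + (l.length : Int), y)] := by
  induction l with
  | nil => intro s; simp [PySem.List.enumerate_nil, PySem.List.enumerate_cons]
  | cons a t ih =>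
      intro s
      simp only [List.cons_append, PySem.List.enumerate_cons, ih (s + 1), List.length_cons]
      push_cast; ring_nf

theorem rwo_mem_enum (D : List Int) (x : Int) (hx : x ∈ D) : ∀ s : Int,
    (s + (List.idxOf x D : Int), x) ∈ PySem.List.enumerate D s := by
  induction D with
  | nil => cases hx
  | cons a t ih =>
      intro s
      by_cases h : x = a
      · subst h; simp [PySem.List.enumerate_cons, List.idxOf_cons_self]
      · have hxt : x ∈ t := by cases hx with | head => exact absurd rfl h | tail _ h' => exact h'
        have hb : (a == x) = false := by simp [Ne.symm h]
        have hidx : List.idxOf x (a :: t) = List.idxOf x t + 1 := by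
          simp [List.idxOf_cons, hb]
        rw [hidx]
        have h2 := ih hxt (s + 1)
        have harith : s + ((List.idxOf x t : Int) + 1) = (s + 1) + (List.idxOf x t : Int) := by ring
        rw [PySem.List.enumerate_cons]
        push_cast
        rw [harith]
        exact List.mem_cons_of_mem _ h2

theorem rwoIndex_keys (D : List Int) : (rwoIndex D).keys = PySem.Set.ofList D := by
  unfold rwoIndex
  rw [PySem.Dict.keys_foldl_insert_key (key := fun p : Int × Int => p.2)]
  simp [PySem.Dict.keys_empty, PySem.List.map_snd_enumerate]
  rfl

theorem rwoIndex_contains (D : List Int) (x : Int) :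
    (rwoIndex D).contains x = decide (x ∈ D) := by
  have hk : ((rwoIndex D).contains x = true) ↔ x ∈ D := by
    rw [PySem.Dict.contains_iff_mem_keys, rwoIndex_keys, PySem.Set.mem_ofList]
  by_cases hx : x ∈ D
  · rw [decide_eq_true hx]; exact hk.mpr hx
  · rw [decide_eq_false hx]
    exact Bool.eq_false_iff.mpr (fun hc => hx (hk.mp hc))

theorem rwoIndex_getD (D : List Int) (x : Int) (hD : D.Nodup) (hx : x ∈ D) :
    (rwoIndex D).getD x 0 = (List.idxOf x D : Int) := by
  have hkeys : (rwoIndex D).keys.Nodup := by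
    rw [rwoIndex_keys]; exact PySem.Set.nodup_ofList D
  have hitems : (rwoIndex D).items = (PySem.List.enumerate D).map (fun p => (p.2, p.1)) := by
    unfold rwoIndex
    rw [PySem.Dict.items_foldl_insert_fresh (k := fun p : Int × Int => p.2) (v := fun p : Int × Int => p.1)]
    · rfl
    · intro a _; simp [PySem.Dict.contains_empty]
    · rw [PySem.List.map_snd_enumerate]; exact hD
  have hmem : (x, (List.idxOf x D : Int)) ∈ (rwoIndex D).items := by
    rw [hitems]
    have := rwo_mem_enum D x hx 0
    rw [zero_add] at this
    exact List.mem_map.mpr ⟨_, this, rfl⟩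
  exact PySem.Dict.getD_of_mem_items _ hmem hkeys 0

theorem rwoIndex_append (S : List Int) (x : Int) :
    rwoIndex (S ++ [x]) = (rwoIndex S).insert x (S.length : Int) := by
  unfold rwoIndex
  rw [rwo_enum_append S x 0, List.foldl_append]
  simp

theorem rwoDedup_prefix : ∀ (rest S : List Int), S <+: rwoDedup S rest := by
  intro rest
  induction rest with
  | nil => intro S; exact List.prefix_refl S
  | cons x xs ih =>
      intro S
      by_cases h : x ∈ S
      · simpa [rwoDedup, h] using ih S
      · simp only [rwoDedup, h, if_false]
        exact (List.prefix_append S [x]).trans (ih (S ++ [x]))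

theorem rwo_idxOf_prefix (S T : List Int) (x : Int) (hpre : S <+: T) (hx : x ∈ S) :
    List.idxOf x T = List.idxOf x S := by
  obtain ⟨t, rfl⟩ := hpre
  exact List.idxOf_append_of_mem hx

theorem mem_of_mem_rwoDedup : ∀ (rest S : List Int) (x : Int),
    x ∈ rwoDedup S rest → x ∈ S ∨ x ∈ rest := by
  intro rest
  induction rest with
  | nil => intro S x h; exact Or.inl h
  | cons a t ih =>
      intro S x h
      by_cases ha : a ∈ S
      · simp only [rwoDedup, ha, if_true] at h
        rcases ih S x h with h' | h'
        · exact Or.inl h'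
        · exact Or.inr (List.mem_cons_of_mem _ h')
      · simp only [rwoDedup, ha, if_false] at h
        rcases ih (S ++ [a]) x h with h' | h'
        · rcases List.mem_append.mp h' with h'' | h''
          · exact Or.inl h''
          · simp at h''; subst h''; exact Or.inr List.mem_cons_self
        · exact Or.inr (List.mem_cons_of_mem _ h')

theorem rwoDedup_append_rest : ∀ (l1 l2 S : List Int),
    rwoDedup S (l1 ++ l2) = rwoDedup (rwoDedup S l1) l2 := by
  intro l1
  induction l1 with
  | nil => intro l2 S; rfl
  | cons a t ih =>
      intro l2 S
      by_cases ha : a ∈ S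
      · simp only [List.cons_append, rwoDedup, ha, if_true]; exact ih l2 S
      · simp only [List.cons_append, rwoDedup, ha, if_false]; exact ih l2 (S ++ [a])

-- set(xs) built by Python's fold of .add is exactly the dedup device
theorem rwo_set_eq_dedup : ∀ (l S : List Int), l.foldl PySem.Set.add S = rwoDedup S l := by
  intro l
  induction l with
  | nil => intro S; rfl
  | cons a t ih =>
      intro S
      by_cases ha : a ∈ S
      · have hc : PySem.Set.contains S a = true := by simp [PySem.Set.contains, ha]
        simp only [List.foldl_cons, PySem.Set.add, hc, if_true, rwoDedup, ha, if_true]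
        exact ih S
      · have hc : PySem.Set.contains S a = false := by simp [PySem.Set.contains, ha]
        simp only [List.foldl_cons, PySem.Set.add, hc, Bool.false_eq_true, if_false,
          rwoDedup, ha, if_false]
        exact ih (S ++ [a])

-- A's code for x (its first-appearance index in the dedup of lst) is the number of distinct
-- values before x's first occurrence.
theorem rwo_key (pre suf : List Int) (x : Int) (hx : x ∉ pre) :
    List.idxOf x (rwoDedup [] (pre ++ x :: suf)) = (rwoDedup [] pre).length := by
  have hP : x ∉ rwoDedup [] pre := by
    intro h
    rcases mem_of_mem_rwoDedup pre [] x h with h' | h'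
    · cases h'
    · exact hx h'
  have h1 : rwoDedup [] (pre ++ x :: suf) = rwoDedup (rwoDedup [] pre ++ [x]) suf := by
    rw [rwoDedup_append_rest]
    simp only [rwoDedup, hP, if_false]
  rw [h1]
  have hxm : x ∈ rwoDedup [] pre ++ [x] := by simp
  rw [rwo_idxOf_prefix _ _ x (rwoDedup_prefix suf _) hxm]
  simp [List.idxOf_append, hP]

theorem rwo_A_inv : ∀ (rest S acc : List Int), S.Nodup →
    rest.foldl
      (fun (st : PySem.Dict Int Int × List Int × Int) num =>
        let p := if st.1.contains num then (st.1, st.2.2) else (st.1.insert num st.2.2, st.2.2 + 1)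
        (p.1, st.2.1 ++ [p.1.getD num 0], p.2))
      (rwoIndex S, acc, (S.length : Int)) =
    (rwoIndex (rwoDedup S rest),
     acc ++ rest.map (fun x => (List.idxOf x (rwoDedup S rest) : Int)),
     ((rwoDedup S rest).length : Int)) := by
  intro rest
  induction rest with
  | nil => intro S acc h; simp [rwoDedup]
  | cons x xs ih =>
      intro S acc hS
      simp only [List.foldl_cons]
      by_cases hx : x ∈ S
      · have hc : (rwoIndex S).contains x = true := by simp [rwoIndex_contains, hx]
        have hd : rwoDedup S (x :: xs) = rwoDedup S xs := by simp [rwoDedup, hx]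
        have hidx : List.idxOf x (rwoDedup S xs) = List.idxOf x S :=
          rwo_idxOf_prefix S _ x (rwoDedup_prefix xs S) hx
        simp only [hc, if_true]
        rw [show ((rwoIndex S, (S.length : Int)).1, acc ++ [(rwoIndex S, (S.length : Int)).1.getD x 0],
              (rwoIndex S, (S.length : Int)).2) =
            (rwoIndex S, acc ++ [(rwoIndex S).getD x 0], (S.length : Int)) from rfl]
        rw [ih S _ hS, hd]
        simp [rwoIndex_getD S x hS hx, List.map_cons, hidx]
      · have hc : (rwoIndex S).contains x = false := by simp [rwoIndex_contains, hx]
        have hd : rwoDedup S (x :: xs) = rwoDedup (S ++ [x]) xs := by simp [rwoDedup, hx]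
        have hS' : (S ++ [x]).Nodup := by
          refine List.Nodup.append hS (List.nodup_singleton x) ?_
          simpa using hx
        have hins : (rwoIndex S).insert x (S.length : Int) = rwoIndex (S ++ [x]) :=
          (rwoIndex_append S x).symm
        have hxm : x ∈ S ++ [x] := by simp
        have hidx1 : List.idxOf x (S ++ [x]) = S.length := by
          simp [List.idxOf_append, hx]
        have hpre : (S ++ [x]) <+: rwoDedup (S ++ [x]) xs := rwoDedup_prefix xs (S ++ [x])
        have hidx : List.idxOf x (rwoDedup (S ++ [x]) xs) = S.length := by
          rw [rwo_idxOf_prefix _ _ x hpre hxm, hidx1]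
        have hlen : ((S.length : Int) + 1) = (((S ++ [x]).length : Int)) := by simp
        have hgetD : (rwoIndex (S ++ [x])).getD x 0 = (S.length : Int) := by
          rw [rwoIndex_getD _ x hS' hxm, hidx1]
        simp only [hc, Bool.false_eq_true, if_false]
        rw [hins, hgetD, hlen, ih (S ++ [x]) _ hS', hd]
        simp [List.map_cons, hidx]

-- ===== VERDICT (by name: the statement is the Claim_ definition above) =====
theorem replace_with_order_spec : Claim_equal_replace_with_order := by
  intro lst _
  unfold Spec_replace_with_order replace_with_order replace_with_order_alt
  have hinitA : (PySem.Dict.empty, ([] : List Int), (0 : Int)) =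
      (rwoIndex [], ([] : List Int), ((([] : List Int)).length : Int)) := rfl
  rw [hinitA, rwo_A_inv lst [] [] List.nodup_nil]
  simp only [List.nil_append]
  apply List.map_congr_left
  intro x hx
  obtain ⟨k, hk⟩ := Option.isSome_iff_exists.mp ((PySem.List.index?_isSome_iff lst x).mpr hx)
  obtain ⟨pre, suf, heq, hlen, hnot⟩ := (PySem.List.index?_eq_some_iff lst x k).mp hk
  rw [hk]
  simp only [Option.getD_some]
  rw [PySem.List.slice_to_natCast]
  subst heq hlen
  rw [List.take_left,
    show PySem.Set.ofList pre = rwoDedup [] pre from rwo_set_eq_dedup pre PySem.Set.empty]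
  simp only [PySem.Set.len]
  rw [rwo_key pre suf x hnot]
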